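-- pv_equiv track=rewrite | github.com/ShawnHymel/KillroyTweetBot | test/led_test_03.py | str_to_led
-- ===== SOURCE A (Python) =====
-- def str_to_led(led_str):
--
--     # Create list of strings for LED matrix
--     led_out = []
--     ledmap = []
--     i = 0
--     pix_str = ''
--     for n in led_str:
--         if n.isdigit():
--             pix_str = pix_str + n
--             if (i % 3 == 2):
--                 ledmap.append(pix_str)
--                 pix_str = ''
--             i = i + 1
--
--     # Convert list of strings to bytes for LED matrix
--     for n in ledmap:
--         r_val = ((1 << 4) << int(n[0])) & 0xe0
--         g_val = ((1 << 1) << int(n[1])) & 0x1c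
--         b_val = int(n[2])
--         pix_val = r_val + g_val + b_val
--         led_out.append(pix_val)
--
--     return led_out
-- ===== SOURCE B (Python) =====
-- def _pix_val(t):
--     r_val = ((1 << 4) << int(t[0])) & 0xe0
--     g_val = ((1 << 1) << int(t[1])) & 0x1c
--     b_val = int(t[2])
--     return r_val + g_val + b_val
--
--
-- def str_to_led(led_str):
--     digits = [c for c in led_str if c.isdigit()]
--     return [_pix_val(digits[3 * k : 3 * k + 3]) for k in range(len(digits) // 3)]
-- ===== Notes on version B (the rewrite author's own statement) =====
-- stated objective: simpler
-- what changed: Replaces A's stateful single-pass accumulator (i % 3 counter plus a growing pix_str buffer) by filtering the digits once and indexing complete triples directly with range(len(digits)//3) and slices.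
import Mathlib
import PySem

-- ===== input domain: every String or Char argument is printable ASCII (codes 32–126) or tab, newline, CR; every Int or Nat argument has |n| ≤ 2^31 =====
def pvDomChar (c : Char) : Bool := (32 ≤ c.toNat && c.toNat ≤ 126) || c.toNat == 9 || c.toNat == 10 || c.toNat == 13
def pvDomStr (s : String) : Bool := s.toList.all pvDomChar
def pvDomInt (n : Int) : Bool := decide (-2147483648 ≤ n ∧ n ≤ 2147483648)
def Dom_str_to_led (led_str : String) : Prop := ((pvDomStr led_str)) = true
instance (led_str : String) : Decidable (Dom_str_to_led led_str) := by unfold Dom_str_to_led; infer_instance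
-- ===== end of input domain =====

-- B replaces A's stateful i % 3 accumulator with filter-then-index over complete triples (simpler decomposition, same cost).

-- int(n[k]): in both programs n is always a 3-char digit string, so pyGet? is some,
-- ofChars? is some, and the defaults are never reached (exact on all reachable inputs)
def pyIntAt (n : List Char) (k : Int) : Int :=
  match PySem.List.pyGet? n k with
  | some c => (PySem.Int.ofChars? [c]).getD 0
  | none => 0

-- the byte formula, verbatim in both Pythons; shift amounts and operands are
-- nonnegative (digits 0-9), so Nat shift/and is exactly Python's << and &
def pixVal (n : List Char) : Int :=
  let r_val : Int := ((((1 <<< 4) <<< (pyIntAt n 0).toNat) &&& 0xe0 : Nat) : Int)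
  let g_val : Int := ((((1 <<< 1) <<< (pyIntAt n 1).toNat) &&& 0x1c : Nat) : Int)
  let b_val : Int := pyIntAt n 2
  r_val + g_val + b_val

-- ===== PORT A =====
-- A's first loop; i is Python's counter (starts at 0, only incremented, so Nat is exact)
def loopA : List Char → List (List Char) → Nat → List Char → List (List Char)
  | [], ledmap, _, _ => ledmap
  | n :: rest, ledmap, i, pix_str =>
    if PySem.Chars.isdigit n then
      let pix_str' := pix_str ++ [n]
      if i % 3 == 2 then loopA rest (ledmap ++ [pix_str']) (i + 1) []
      else loopA rest ledmap (i + 1) pix_str'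
    else loopA rest ledmap i pix_str

def str_to_led (led_str : String) : List Int :=
  (loopA led_str.toList [] 0 []).map (fun n => pixVal n)

-- ===== PORT B =====
def str_to_led_alt (led_str : String) : List Int :=
  let digits := led_str.toList.filter (fun c => PySem.Chars.isdigit c)
  (List.range (digits.length / 3)).map (fun (k : Nat) =>
    pixVal (PySem.List.slice digits (some (3 * (k : Int))) (some (3 * (k : Int) + 3))))

-- ===== PRECONDITION & SPEC =====
def Spec_str_to_led (led_str : String) (out : List Int) : Prop := out = str_to_led_alt led_str
instance (led_str : String) (out : List Int) : Decidable (Spec_str_to_led led_str out) := by unfold Spec_str_to_led; infer_instance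

-- ===== CLAIM (what is proved, stated in full; the proofs are below) =====
def Claim_equal_str_to_led : Prop := ∀ (led_str : String), Dom_str_to_led led_str → Spec_str_to_led led_str (str_to_led led_str)

-- ===== LEMMAS AND PROOFS =====

-- the complete 3-groups of a list (incomplete tail dropped)
def groups : List Char → List (List Char)
  | a :: b :: c :: rest => [a, b, c] :: groups rest
  | _ => []

lemma groups_short : ∀ (l : List Char), l.length < 3 → groups l = []
  | [], _ => rfl
  | [_], _ => rfl
  | [_, _], _ => rfl
  | _ :: _ :: _ :: _, h => by simp at h; omega

-- A's loop invariant: pix_str holds the i % 3 digits of the current partial group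
lemma loopA_eq_groups : ∀ (cs : List Char) (acc : List (List Char)) (i : Nat) (pix : List Char),
    pix.length = i % 3 →
    loopA cs acc i pix = acc ++ groups (pix ++ cs.filter (fun c => PySem.Chars.isdigit c)) := by
  intro cs
  induction cs with
  | nil =>
    intro acc i pix h
    simp [loopA, groups_short pix (by omega)]
  | cons c cs ih =>
    intro acc i pix h
    by_cases hd : PySem.Chars.isdigit c
    · by_cases h2 : i % 3 = 2
      · obtain ⟨a, b, rfl⟩ := List.length_eq_two.mp (h.trans h2)
        rw [show loopA (c :: cs) acc i [a, b]
              = loopA cs (acc ++ [[a, b, c]]) (i + 1) [] by simp [loopA, hd, h2]]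
        rw [ih (acc ++ [[a, b, c]]) (i + 1) [] (by simp; omega)]
        simp [hd, groups]
      · rw [show loopA (c :: cs) acc i pix
              = loopA cs acc (i + 1) (pix ++ [c]) by simp [loopA, hd, h2]]
        rw [ih acc (i + 1) (pix ++ [c]) (by simp [h]; omega)]
        simp [hd]
    · rw [show loopA (c :: cs) acc i pix = loopA cs acc i pix by simp [loopA, hd]]
      rw [ih acc i pix h]
      simp [hd]

-- B's indexed slices enumerate exactly the complete 3-groups
lemma range_slice_eq_groups (f : List Char → Int) : ∀ (ds : List Char),
    (List.range (ds.length / 3)).map (fun (k : Nat) =>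
        f (PySem.List.slice ds (some (3 * (k : Int))) (some (3 * (k : Int) + 3))))
      = (groups ds).map f
  | [] => by simp [groups]
  | [l] => by rw [groups_short [l] (by simp)]; norm_num
  | [l, m] => by rw [groups_short [l, m] (by simp)]; norm_num
  | a :: b :: c :: rest => by
    have hlen : (a :: b :: c :: rest).length / 3 = rest.length / 3 + 1 := by
      simp; omega
    have htail : ∀ k : Nat,
        PySem.List.slice (a :: b :: c :: rest) (some (3 * ((k + 1 : Nat) : Int)))
            (some (3 * ((k + 1 : Nat) : Int) + 3))
          = PySem.List.slice rest (some (3 * (k : Int))) (some (3 * (k : Int) + 3)) := by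
      intro k
      rw [show (3 * ((k + 1 : Nat) : Int)) = ((3 * k + 3 : Nat) : Int) by push_cast; ring,
          show (((3 * k + 3 : Nat) : Int) + 3) = ((3 * k + 3 + 3 : Nat) : Int) by push_cast; ring,
          show (3 * (k : Int)) = ((3 * k : Nat) : Int) by push_cast; ring,
          show (((3 * k : Nat) : Int) + 3) = ((3 * k + 3 : Nat) : Int) by push_cast; ring,
          PySem.List.slice_natCast, PySem.List.slice_natCast]
      simp [List.drop_succ_cons]
    rw [hlen, List.range_succ_eq_map, List.map_cons, List.map_map, groups, List.map_cons]
    congr 1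
    rw [← range_slice_eq_groups f rest]
    refine List.map_congr_left ?_
    intro k _
    simp only [Function.comp_apply, Nat.succ_eq_add_one]
    rw [htail k]

-- ===== VERDICT (by name: the statement is the Claim_ definition above) =====
theorem str_to_led_spec : Claim_equal_str_to_led := by
  intro led_str _
  unfold Spec_str_to_led str_to_led str_to_led_alt
  rw [loopA_eq_groups led_str.toList [] 0 [] rfl,
      range_slice_eq_groups (fun n => pixVal n)]
  simp
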